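-- pv_equiv track=rewrite | github.com/chikeabuah/pegasus | pegasus.py | group_postprocess
-- ===== SOURCE A (Python) =====
-- def group_postprocess(groups, length):
--   output = []
--   for t in range(length):
--     myOutput = []
--     for g in groups:
--       if t in g:
--         myOutput.append(g[:g.index(t)+1])
--         break
--       else:
--         myOutput.append(g)
--     output.append(myOutput)
--   return output
-- ===== SOURCE B (Python) =====
-- def group_postprocess(groups, length):
--     # One pass over all groups records, for each value at its first occurrence,
--     # (group index, the group, position); each t is then one dict lookup + slices.
--     idx = {}
--     for gi, g in enumerate(groups):
--         for p, v in enumerate(g):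
--             if v not in idx:
--                 idx[v] = (gi, g, p)
--     out = []
--     for t in range(length):
--         hit = idx.get(t)
--         if hit is None:
--             out.append(list(groups))
--         else:
--             gi, g, p = hit
--             out.append(groups[:gi] + [g[:p + 1]])
--     return out
-- ===== Notes on version B (the rewrite author's own statement) =====
-- stated objective: alternative
-- what changed: Replaces A's per-t rescan of all groups (membership test, .index and break per group) by a single pass that records each value's first occurrence (group index, group, position) in a dict; each t is then answered by one dict lookup plus slicing.
import Mathlib
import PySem

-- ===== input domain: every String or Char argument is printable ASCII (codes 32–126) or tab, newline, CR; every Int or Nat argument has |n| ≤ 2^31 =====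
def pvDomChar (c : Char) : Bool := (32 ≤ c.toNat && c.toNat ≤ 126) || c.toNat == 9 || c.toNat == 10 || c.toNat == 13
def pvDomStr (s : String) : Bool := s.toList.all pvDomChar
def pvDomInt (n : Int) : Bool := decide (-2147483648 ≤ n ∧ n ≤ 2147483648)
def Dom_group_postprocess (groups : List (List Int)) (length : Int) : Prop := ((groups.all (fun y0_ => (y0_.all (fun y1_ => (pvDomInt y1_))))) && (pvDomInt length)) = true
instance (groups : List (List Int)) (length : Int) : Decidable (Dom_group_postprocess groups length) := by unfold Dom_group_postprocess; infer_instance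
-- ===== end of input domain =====

-- ===== PORT A =====
-- B precomputes one first-occurrence table in a single pass and answers each t by a dict lookup plus slicing; A rescans all groups for every t. (objective: alternative)

-- inner loop of A: 'for g in groups: if t in g: append g[:g.index(t)+1]; break else append g'
def gpRow (t : Int) : List (List Int) → List (List Int)
  | [] => []
  | g :: rest =>
    match PySem.List.index? g t with
    | some i => [g.take (i + 1)]
    | none => g :: gpRow t rest

def group_postprocess (groups : List (List Int)) (length : Int) : List (List (List Int)) :=
  (PySem.List.pyRange 0 length 1).foldl (fun output t => output ++ [gpRow t groups]) []

-- ===== PORT B =====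
-- 'for p, v in enumerate(g): if v not in idx: idx[v] = (gi, g, p)'
def gpAddGroup (gi : Nat) (g : List Int)
    (d : PySem.Dict Int (Nat × List Int × Nat)) (p : Nat) :
    List Int → PySem.Dict Int (Nat × List Int × Nat)
  | [] => d
  | v :: vs =>
    gpAddGroup gi g (if (d.get? v).isSome then d else d.insert v (gi, g, p)) (p + 1) vs

-- 'for gi, g in enumerate(groups): …'
def gpBuild (d : PySem.Dict Int (Nat × List Int × Nat)) (gi : Nat) :
    List (List Int) → PySem.Dict Int (Nat × List Int × Nat)
  | [] => d
  | g :: rest => gpBuild (gpAddGroup gi g d 0 g) (gi + 1) rest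

def group_postprocess_alt (groups : List (List Int)) (length : Int) : List (List (List Int)) :=
  let idx := gpBuild PySem.Dict.empty 0 groups
  (PySem.List.pyRange 0 length 1).map (fun t =>
    match idx.get? t with
    | none => groups
    | some (gi, g, p) => groups.take gi ++ [g.take (p + 1)])

-- ===== PRECONDITION & SPEC =====
def Spec_group_postprocess (groups : List (List Int)) (length : Int) (out : List (List (List Int))) : Prop := out = group_postprocess_alt groups length
instance (groups : List (List Int)) (length : Int) (out : List (List (List Int))) : Decidable (Spec_group_postprocess groups length out) := by unfold Spec_group_postprocess; infer_instance

-- ===== CLAIM (what is proved, stated in full; the proofs are below) =====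
def Claim_equal_group_postprocess : Prop := ∀ (groups : List (List Int)) (length : Int), Dom_group_postprocess groups length → Spec_group_postprocess groups length (group_postprocess groups length)

-- ===== LEMMAS AND PROOFS =====

-- first hit, scanning groups left to right, counting preceding groups
def gpFind (t : Int) (gi : Nat) : List (List Int) → Option (Nat × List Int × Nat)
  | [] => none
  | g :: rest =>
    match PySem.List.index? g t with
    | some i => some (gi, g, i)
    | none => gpFind t (gi + 1) rest

theorem gpAddGroup_get? (gi : Nat) (g : List Int)
    (d : PySem.Dict Int (Nat × List Int × Nat)) (t : Int) :
    ∀ (vs : List Int) (p : Nat),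
      (gpAddGroup gi g d p vs).get? t =
        ((d.get? t).or ((PySem.List.index? vs t).map (fun i => (gi, g, p + i)))) := by
  intro vs
  induction vs generalizing d with
  | nil => intro p; simp [gpAddGroup, PySem.List.index?]
  | cons v vs ih =>
      intro p
      by_cases hv : v = t
      · subst hv
        cases hd : d.get? v with
        | some w =>
            simp only [gpAddGroup, hd, Option.isSome_some, if_pos, ih, Option.some_or]
        | none =>
            have : (d.insert v (gi, g, p)).get? v = some (gi, g, p) :=
              PySem.Dict.get?_insert_self d v _
            simp only [gpAddGroup, hd, Option.isSome_none, Bool.false_eq_true, if_neg,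
              not_false_iff, ih, this, Option.some_or, Option.none_or]
            rw [PySem.List.index?_cons_self]
            simp
      · have hget :
            (if (d.get? v).isSome then d else d.insert v (gi, g, p)).get? t = d.get? t := by
          split
          · rfl
          · rw [PySem.Dict.get?_insert]
            exact if_neg (fun h => hv h.symm)
        simp only [gpAddGroup, ih, hget]
        rw [PySem.List.index?_cons_of_ne _ (fun h => hv h)]
        cases PySem.List.index? vs t with
        | none => simp
        | some i =>
            have : p + (i + 1) = p + 1 + i := by omega
            simp [this]

theorem gpBuild_get? (t : Int) :
    ∀ (groups : List (List Int)) (d : PySem.Dict Int (Nat × List Int × Nat)) (gi : Nat),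
      (gpBuild d gi groups).get? t = (d.get? t).or (gpFind t gi groups) := by
  intro groups
  induction groups with
  | nil => intro d gi; simp [gpBuild, gpFind]
  | cons g rest ih =>
      intro d gi
      simp only [gpBuild, ih, gpAddGroup_get?, Option.or_assoc, gpFind]
      cases PySem.List.index? g t with
      | none => simp
      | some i => simp

theorem gpFind_row (t : Int) :
    ∀ (rest pre : List (List Int)),
      (match gpFind t pre.length rest with
        | none => pre ++ rest
        | some (gi, g, p) => (pre ++ rest).take gi ++ [g.take (p + 1)]) =
      pre ++ gpRow t rest := by
  intro rest
  induction rest with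
  | nil => intro pre; simp [gpFind, gpRow]
  | cons g rest ih =>
      intro pre
      simp only [gpFind, gpRow]
      cases PySem.List.index? g t with
      | some i =>
          simp [List.take_left']
      | none =>
          have h := ih (pre ++ [g])
          simpa using h

theorem gpRows_eq (groups : List (List Int)) (t : Int) :
    (match (gpBuild PySem.Dict.empty 0 groups).get? t with
      | none => groups
      | some (gi, g, p) => groups.take gi ++ [g.take (p + 1)]) = gpRow t groups := by
  rw [gpBuild_get?]
  simpa using gpFind_row t groups []

-- ===== VERDICT (by name: the statement is the Claim_ definition above) =====
theorem group_postprocess_spec : Claim_equal_group_postprocess := by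
  intro groups length _
  unfold Spec_group_postprocess group_postprocess group_postprocess_alt
  induction PySem.List.pyRange 0 length 1 using List.reverseRecOn with
  | nil => rfl
  | append_singleton l t ih =>
      simp only [List.foldl_append, List.map_append, List.foldl_cons, List.foldl_nil,
        List.map_cons, List.map_nil, ih]
      rw [gpRows_eq]
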